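-- pv_equiv track=rewrite | github.com/kitchenartsandletters/sr-ops-suite | scripts/daily_sales_pdf.py | strip_leading_articles
-- ===== SOURCE A (Python) =====
-- def strip_leading_articles(title):
--     if not title:
--         return title
--     lowered = title.lstrip()
--     articles = ["the ", "a ", "an "]
--     for art in articles:
--         if lowered.lower().startswith(art):
--             return lowered[len(art):]
--     return lowered
-- ===== SOURCE B (Python) =====
-- def strip_leading_articles(title):
--     if not title:
--         return title
--     lowered = title.lstrip()
--     i = lowered.find(' ')
--     if i != -1 and lowered[:i].lower() in ("the", "a", "an"):
--         return lowered[i + 1:]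
--     return lowered
-- ===== Notes on version B (the rewrite author's own statement) =====
-- stated objective: alternative
-- what changed: B locates the first literal space once and tests the lowercased first token for membership in the three-word article set, slicing past that space, instead of A's loop of three lowercased startswith prefix checks.
import Mathlib
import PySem

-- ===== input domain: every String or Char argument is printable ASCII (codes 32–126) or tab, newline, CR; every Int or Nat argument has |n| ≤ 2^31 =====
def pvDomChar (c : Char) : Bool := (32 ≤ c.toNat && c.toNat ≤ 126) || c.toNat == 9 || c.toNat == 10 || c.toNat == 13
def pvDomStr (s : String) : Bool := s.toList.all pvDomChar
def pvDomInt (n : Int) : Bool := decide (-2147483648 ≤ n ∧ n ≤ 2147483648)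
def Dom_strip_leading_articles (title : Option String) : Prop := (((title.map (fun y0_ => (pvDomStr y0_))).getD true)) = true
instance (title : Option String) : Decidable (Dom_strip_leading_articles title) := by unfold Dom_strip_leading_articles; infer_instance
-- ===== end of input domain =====

-- B replaces A's loop over three "article + space" prefixes of the lowercased string by
-- locating the first literal space and testing the lowercased first token for membership
-- in {"the","a","an"} (objective: alternative single-scan decomposition, same cost).

-- ===== PORT A =====
-- literal port of A: guard on falsy title, lstrip, then the three startswith checks in order
def strip_leading_articles (title : Option String) : Option String :=
  match title with
  | none => none
  | some t =>
    if t.toList.length = 0 then some t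
    else
      let lowered := PySem.Chars.lstrip t.toList
      if PySem.Chars.startswith (PySem.Chars.lower lowered) "the ".toList then
        some (String.ofList (PySem.Chars.slice lowered (some 4) none))
      else if PySem.Chars.startswith (PySem.Chars.lower lowered) "a ".toList then
        some (String.ofList (PySem.Chars.slice lowered (some 2) none))
      else if PySem.Chars.startswith (PySem.Chars.lower lowered) "an ".toList then
        some (String.ofList (PySem.Chars.slice lowered (some 3) none))
      else some (String.ofList lowered)

-- ===== PORT B =====
-- literal port of B: find the first space, test the lowercased first token, slice the rest
def strip_leading_articles_alt (title : Option String) : Option String :=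
  match title with
  | none => none
  | some t =>
    if t.toList.length = 0 then some t
    else
      let lowered := PySem.Chars.lstrip t.toList
      let i := PySem.Chars.find lowered " ".toList
      if i ≠ -1 ∧ PySem.Chars.lower (PySem.Chars.slice lowered none (some i)) ∈
          ["the".toList, "a".toList, "an".toList] then
        some (String.ofList (PySem.Chars.slice lowered (some (i + 1)) none))
      else some (String.ofList lowered)

-- ===== PRECONDITION & SPEC =====
def Spec_strip_leading_articles (title : Option String) (out : Option String) : Prop := out = strip_leading_articles_alt title
instance (title : Option String) (out : Option String) : Decidable (Spec_strip_leading_articles title out) := by unfold Spec_strip_leading_articles; infer_instance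

-- ===== CLAIM (what is proved, stated in full; the proofs are below) =====
def Claim_equal_strip_leading_articles : Prop := ∀ (title : Option String), Dom_strip_leading_articles title → Spec_strip_leading_articles title (strip_leading_articles title)

-- ===== LEMMAS AND PROOFS =====

-- lowercasing never turns a non-space character into a space
lemma lowerChar_ne_space (c : Char) (h : ¬ c = ' ') : ¬ PySem.Chars.lowerChar c = ' ' := by
  simp only [PySem.Chars.lowerChar, PySem.Chars.isupper]
  split_ifs with hu
  · simp only [Bool.and_eq_true, decide_eq_true_eq, Char.le_def] at hu
    have h1 : 65 ≤ c.toNat := hu.1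
    have h2 : c.toNat ≤ 90 := hu.2
    intro heq
    have := congrArg Char.toNat heq
    rw [Char.toNat_ofNat] at this
    rw [if_pos (Or.inl (by omega : c.toNat + 32 < 0xd800))] at this
    have h32 : (' ' : Char).toNat = 32 := by decide
    omega
  · exact h

-- find.go for the single-character pattern [' '] returns -1 or an offset below the length
lemma find_go_space_cases (w : List Char) : ∀ (k : Nat),
    PySem.Chars.find.go [' '] w k = -1 ∨
    ∃ j : Nat, PySem.Chars.find.go [' '] w k = (k : Int) + j ∧ j < w.length := by
  induction w with
  | nil => intro k; left; simp [PySem.Chars.find.go]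
  | cons x w ih =>
    intro k
    by_cases hx : x = ' '
    · right
      refine ⟨0, ?_, by simp⟩
      simp [PySem.Chars.find.go, List.isPrefixOf, hx]
    · rcases ih (k + 1) with h | ⟨j, hj, hlen⟩
      · left
        have hx' : (' ' == x) = false := by simp [Ne.symm hx]
        simp [PySem.Chars.find.go, List.isPrefixOf, hx', h]
      · right
        have hx' : (' ' == x) = false := by simp [Ne.symm hx]
        refine ⟨j + 1, ?_, by simpa using Nat.succ_lt_succ hlen⟩
        simp only [PySem.Chars.find.go, List.isPrefixOf, hx', Bool.false_and,
          Bool.false_eq_true, if_false] at *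
        rw [hj]; push_cast; ring

-- drop-by-a-small-numeral slices of a cons-shaped list (shape-specific, not library facts)
lemma lslice_from_two {α : Type} (x y : α) (t : List α) :
    PySem.List.slice (x :: y :: t) (some 2) none = t := by
  rw [PySem.List.slice_from _ (by norm_num)]; rfl

lemma lslice_from_three {α : Type} (x y z : α) (t : List α) :
    PySem.List.slice (x :: y :: z :: t) (some 3) none = t := by
  rw [PySem.List.slice_from _ (by norm_num)]; rfl

lemma lslice_from_four {α : Type} (x y z u : α) (t : List α) :
    PySem.List.slice (x :: y :: z :: u :: t) (some 4) none = t := by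
  rw [PySem.List.slice_from _ (by norm_num)]; rfl

-- the heart of the equivalence, stated on the character list after lstrip
lemma key (cs : List Char) :
    (if PySem.Chars.find cs " ".toList ≠ -1 ∧
        PySem.Chars.lower (PySem.Chars.slice cs none (some (PySem.Chars.find cs " ".toList))) ∈
          ["the".toList, "a".toList, "an".toList] then
      some (String.ofList (PySem.Chars.slice cs (some (PySem.Chars.find cs " ".toList + 1)) none))
    else some (String.ofList cs))
    = (if PySem.Chars.startswith (PySem.Chars.lower cs) "the ".toList then
        some (String.ofList (PySem.Chars.slice cs (some 4) none))
      else if PySem.Chars.startswith (PySem.Chars.lower cs) "a ".toList then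
        some (String.ofList (PySem.Chars.slice cs (some 2) none))
      else if PySem.Chars.startswith (PySem.Chars.lower cs) "an ".toList then
        some (String.ofList (PySem.Chars.slice cs (some 3) none))
      else some (String.ofList cs)) := by
  have hsp : (" ".toList : List Char) = [' '] := rfl
  have hlsp : PySem.Chars.lowerChar ' ' = ' ' := by decide
  rw [hsp]
  rcases cs with _ | ⟨a, cs⟩
  · decide
  by_cases ha : a = ' '
  · subst ha
    have hf : PySem.Chars.find (' ' :: cs) [' '] = 0 := by
      simp [PySem.Chars.find, PySem.Chars.find.go, List.isPrefixOf]
    rw [hf, PySem.Chars.slice_eq_listSlice, PySem.List.slice_to _ (by norm_num)]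
    simp [PySem.Chars.startswith, PySem.Chars.lower, List.isPrefixOf, hlsp]
  rcases cs with _ | ⟨b, cs⟩
  · have hf : PySem.Chars.find [a] [' '] = -1 := by
      simp [PySem.Chars.find, PySem.Chars.find.go, List.isPrefixOf, Ne.symm ha]
    rw [hf]
    simp [PySem.Chars.startswith, PySem.Chars.lower, List.isPrefixOf]
  by_cases hb : b = ' '
  · subst hb
    have hf : PySem.Chars.find (a :: ' ' :: cs) [' '] = 1 := by
      simp [PySem.Chars.find, PySem.Chars.find.go, List.isPrefixOf, Ne.symm ha]
    rw [hf, PySem.Chars.slice_eq_listSlice, PySem.List.slice_to _ (by norm_num),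
      PySem.Chars.slice_eq_listSlice, PySem.List.slice_from _ (by norm_num)]
    by_cases haa : PySem.Chars.lowerChar a = 'a'
    · simp [PySem.Chars.startswith, PySem.Chars.lower, List.isPrefixOf, hlsp, haa, lslice_from_two]
    · simp [PySem.Chars.startswith, PySem.Chars.lower, List.isPrefixOf, hlsp, haa, Ne.symm haa]
  rcases cs with _ | ⟨c, cs⟩
  · have hf : PySem.Chars.find [a, b] [' '] = -1 := by
      simp [PySem.Chars.find, PySem.Chars.find.go, List.isPrefixOf, Ne.symm ha, Ne.symm hb]
    rw [hf]
    simp [PySem.Chars.startswith, PySem.Chars.lower, List.isPrefixOf,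
      Ne.symm (lowerChar_ne_space b hb)]
  by_cases hc : c = ' '
  · subst hc
    have hf : PySem.Chars.find (a :: b :: ' ' :: cs) [' '] = 2 := by
      simp [PySem.Chars.find, PySem.Chars.find.go, List.isPrefixOf, Ne.symm ha, Ne.symm hb]
    rw [hf, PySem.Chars.slice_eq_listSlice, PySem.List.slice_to _ (by norm_num),
      PySem.Chars.slice_eq_listSlice, PySem.List.slice_from _ (by norm_num)]
    by_cases h1 : PySem.Chars.lowerChar a = 'a'
    · by_cases h2 : PySem.Chars.lowerChar b = 'n'
      · simp [PySem.Chars.startswith, PySem.Chars.lower, List.isPrefixOf, hlsp, h1, h2, lslice_from_three]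
      · simp [PySem.Chars.startswith, PySem.Chars.lower, List.isPrefixOf, hlsp, h1, h2, Ne.symm h2, Ne.symm (lowerChar_ne_space b hb)]
    · by_cases h2 : PySem.Chars.lowerChar b = 'n'
      · simp [PySem.Chars.startswith, PySem.Chars.lower, List.isPrefixOf, hlsp, h1, Ne.symm h1, h2]
      · simp [PySem.Chars.startswith, PySem.Chars.lower, List.isPrefixOf, hlsp, h1, Ne.symm h1, h2, Ne.symm h2, Ne.symm (lowerChar_ne_space b hb)]
  rcases cs with _ | ⟨d, w⟩
  · have hf : PySem.Chars.find [a, b, c] [' '] = -1 := by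
      simp [PySem.Chars.find, PySem.Chars.find.go, List.isPrefixOf, Ne.symm ha, Ne.symm hb,
        Ne.symm hc]
    rw [hf]
    simp [PySem.Chars.startswith, PySem.Chars.lower, List.isPrefixOf,
      Ne.symm (lowerChar_ne_space b hb), Ne.symm (lowerChar_ne_space c hc)]
  by_cases hd : d = ' '
  · subst hd
    have hf : PySem.Chars.find (a :: b :: c :: ' ' :: w) [' '] = 3 := by
      simp [PySem.Chars.find, PySem.Chars.find.go, List.isPrefixOf, Ne.symm ha, Ne.symm hb,
        Ne.symm hc]
    rw [hf, PySem.Chars.slice_eq_listSlice, PySem.List.slice_to _ (by norm_num),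
      PySem.Chars.slice_eq_listSlice, PySem.List.slice_from _ (by norm_num)]
    by_cases h1 : PySem.Chars.lowerChar a = 't'
    · by_cases h2 : PySem.Chars.lowerChar b = 'h'
      · by_cases h3 : PySem.Chars.lowerChar c = 'e'
        · simp [PySem.Chars.startswith, PySem.Chars.lower, List.isPrefixOf, hlsp, h1, h2, h3, lslice_from_four]
        · simp [PySem.Chars.startswith, PySem.Chars.lower, List.isPrefixOf, hlsp, h1, h2, h3, Ne.symm h3]
      · by_cases h3 : PySem.Chars.lowerChar c = 'e'
        · simp [PySem.Chars.startswith, PySem.Chars.lower, List.isPrefixOf, hlsp, h1, h2, Ne.symm h2, h3]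
        · simp [PySem.Chars.startswith, PySem.Chars.lower, List.isPrefixOf, hlsp, h1, h2, Ne.symm h2, h3, Ne.symm h3]
    · by_cases h2 : PySem.Chars.lowerChar b = 'h'
      · by_cases h3 : PySem.Chars.lowerChar c = 'e'
        · simp [PySem.Chars.startswith, PySem.Chars.lower, List.isPrefixOf, hlsp, h1, Ne.symm h1, h2, h3]
        · simp [PySem.Chars.startswith, PySem.Chars.lower, List.isPrefixOf, hlsp, h1, Ne.symm h1, h2, h3, Ne.symm h3]
      · by_cases h3 : PySem.Chars.lowerChar c = 'e'
        · simp [PySem.Chars.startswith, PySem.Chars.lower, List.isPrefixOf, hlsp, h1, Ne.symm h1, h2, Ne.symm h2, h3, Ne.symm (lowerChar_ne_space b hb)]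
        · simp [PySem.Chars.startswith, PySem.Chars.lower, List.isPrefixOf, hlsp, h1, Ne.symm h1, h2, Ne.symm h2, h3, Ne.symm h3, Ne.symm (lowerChar_ne_space b hb), Ne.symm (lowerChar_ne_space c hc)]
  · have hf : PySem.Chars.find (a :: b :: c :: d :: w) [' '] = PySem.Chars.find.go [' '] w 4 := by
      simp [PySem.Chars.find, PySem.Chars.find.go, List.isPrefixOf, Ne.symm ha, Ne.symm hb,
        Ne.symm hc, Ne.symm hd]
    have hA : ∀ r : Option String,
        (if PySem.Chars.startswith (PySem.Chars.lower (a :: b :: c :: d :: w)) "the ".toList then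
          some (String.ofList (PySem.Chars.slice (a :: b :: c :: d :: w) (some 4) none))
        else if PySem.Chars.startswith (PySem.Chars.lower (a :: b :: c :: d :: w)) "a ".toList then
          some (String.ofList (PySem.Chars.slice (a :: b :: c :: d :: w) (some 2) none))
        else if PySem.Chars.startswith (PySem.Chars.lower (a :: b :: c :: d :: w)) "an ".toList then
          some (String.ofList (PySem.Chars.slice (a :: b :: c :: d :: w) (some 3) none))
        else r) = r := by
      intro r
      simp [PySem.Chars.startswith, PySem.Chars.lower, List.isPrefixOf,
        Ne.symm (lowerChar_ne_space b hb), Ne.symm (lowerChar_ne_space c hc),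
        Ne.symm (lowerChar_ne_space d hd)]
    rw [hA]
    rcases find_go_space_cases w 4 with hg | ⟨j, hj, hjl⟩
    · rw [hf, hg]
      simp
    · rw [hf, hj]
      rw [if_neg]
      rintro ⟨-, hmem⟩
      rw [PySem.Chars.slice_eq_listSlice, PySem.List.slice_to _ (by positivity)] at hmem
      have htn : (((4 : Nat) : Int) + (j : Int)).toNat = 4 + j := by omega
      rw [htn] at hmem
      have hlen : (PySem.Chars.lower (List.take (4 + j) (a :: b :: c :: d :: w))).length
          = 4 + min j w.length := by
        simp [PySem.Chars.lower]
        omega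
      simp only [List.mem_cons, List.not_mem_nil, or_false] at hmem
      rcases hmem with h | h | h <;> rw [h] at hlen <;> simp at hlen <;> omega

-- ===== VERDICT (by name: the statement is the Claim_ definition above) =====
theorem strip_leading_articles_spec : Claim_equal_strip_leading_articles := by
  intro title _
  unfold Spec_strip_leading_articles
  match title with
  | none => rfl
  | some t =>
    unfold strip_leading_articles strip_leading_articles_alt
    by_cases ht : t.toList.length = 0
    · simp [ht]
    · simp only [ht, if_false]
      exact (key (PySem.Chars.lstrip t.toList)).symm
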